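-- pv_equiv track=rewrite | github.com/andersen-mats/uio | IN1000/trix/05/inneholder.py | inneholder
-- ===== SOURCE A (Python) =====
-- def inneholder(str1, str2):
--     chars = set()
--     for c in str2:
--         chars.add(c)
--
--     for c in str1:
--         if c not in chars:
--             return False
--
--     chars2 = {}
--     for c in str2:
--         if c not in chars2:
--             chars2[c] = 1
--         else:
--             chars2[c] += 1
--
--     chars1 = {}
--     for c in str1:
--         if c not in chars1:
--             chars1[c] = 1
--         else:
--             chars1[c] += 1
--
--     for c in chars1:
--         if not chars1[c] <= chars2[c]:
--             return False
--
--     return True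
-- ===== SOURCE B (Python) =====
-- def inneholder(str1, str2):
--     remaining = {}
--     for c in str2:
--         remaining[c] = remaining.get(c, 0) + 1
--     for c in str1:
--         if remaining.get(c, 0) == 0:
--             return False
--         remaining[c] -= 1
--     return True
-- ===== Notes on version B (the rewrite author's own statement) =====
-- stated objective: alternative
-- what changed: Replaces A's four separate passes (set build, membership scan, two count tables, final key comparison) by one count dict of str2 consumed in a single interleaved pass over str1 with early exit.
import Mathlib
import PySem

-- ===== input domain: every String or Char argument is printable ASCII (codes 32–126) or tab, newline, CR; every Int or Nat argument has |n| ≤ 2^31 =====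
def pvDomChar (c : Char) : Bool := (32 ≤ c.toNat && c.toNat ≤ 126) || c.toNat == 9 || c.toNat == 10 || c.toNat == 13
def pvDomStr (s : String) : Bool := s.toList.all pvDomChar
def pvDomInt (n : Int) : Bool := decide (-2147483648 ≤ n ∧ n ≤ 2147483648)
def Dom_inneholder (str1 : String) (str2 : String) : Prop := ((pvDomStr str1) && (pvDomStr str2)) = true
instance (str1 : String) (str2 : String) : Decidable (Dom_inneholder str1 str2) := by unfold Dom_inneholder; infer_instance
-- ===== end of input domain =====

-- B replaces A's four separate passes by one count dict of str2 consumed in a single pass over str1 with early exit (alternative decomposition, same asymptotic cost).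

-- ===== PORT A =====
-- 'for c in str1: if c not in chars: return False'
def aMemLoop (chars : PySem.Set Char) : List Char → Bool
  | [] => true
  | c :: rest => if PySem.Set.contains chars c then aMemLoop chars rest else false

-- 'if c not in d: d[c] = 1 else: d[c] += 1' counting loop over a string
def aCounter (l : List Char) : PySem.Dict Char Int :=
  l.foldl (fun d c => if d.contains c then d.insert c (d.getD c 0 + 1) else d.insert c 1)
    PySem.Dict.empty

-- 'for c in chars1: if not chars1[c] <= chars2[c]: return False' over the keys of chars1.
-- chars2[c] is ported as getD _ 0: by the time this loop runs, every c of str1 occurs in str2,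
-- so the key is present and Python's KeyError is unreachable.
def aCmpLoop : PySem.Dict Char Int → PySem.Dict Char Int → List Char → Bool
  | _, _, [] => true
  | chars1, chars2, c :: rest =>
    if ¬ (chars1.getD c 0 ≤ chars2.getD c 0) then false else aCmpLoop chars1 chars2 rest

def inneholder (str1 : String) (str2 : String) : Bool :=
  let chars : PySem.Set Char := str2.toList.foldl PySem.Set.add PySem.Set.empty
  if aMemLoop chars str1.toList then
    let chars2 := aCounter str2.toList
    let chars1 := aCounter str1.toList
    aCmpLoop chars1 chars2 chars1.keys
  else false

-- ===== PORT B =====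
-- 'for c in str1: if remaining.get(c, 0) == 0: return False; remaining[c] -= 1'
def bLoop : PySem.Dict Char Int → List Char → Bool
  | _, [] => true
  | remaining, c :: rest =>
    if remaining.getD c 0 == 0 then false
    else bLoop (remaining.modify c 0 (· - 1)) rest

def inneholder_alt (str1 : String) (str2 : String) : Bool :=
  let remaining := str2.toList.foldl (fun d c => d.modify c 0 (· + 1)) PySem.Dict.empty
  bLoop remaining str1.toList

-- ===== PRECONDITION & SPEC =====
def Spec_inneholder (str1 : String) (str2 : String) (out : Bool) : Prop := out = inneholder_alt str1 str2
instance (str1 : String) (str2 : String) (out : Bool) : Decidable (Spec_inneholder str1 str2 out) := by unfold Spec_inneholder; infer_instance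

-- ===== CLAIM (what is proved, stated in full; the proofs are below) =====
def Claim_equal_inneholder : Prop := ∀ (str1 : String) (str2 : String), Dom_inneholder str1 str2 → Spec_inneholder str1 str2 (inneholder str1 str2)

-- ===== LEMMAS AND PROOFS =====

-- the common specification both programs decide: str1's character multiset is contained in str2's
def countLE (l1 l2 : List Char) : Prop := ∀ c : Char, (l1.count c : Int) ≤ (l2.count c : Int)

lemma aMemLoop_eq_true_iff (chars : PySem.Set Char) (l : List Char) :
    aMemLoop chars l = true ↔ ∀ c ∈ l, c ∈ chars := by
  induction l with
  | nil => simp [aMemLoop]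
  | cons c rest ih =>
    by_cases h : c ∈ chars
    · simp [aMemLoop, h, ih]
    · simp [aMemLoop, h]

lemma aCmpLoop_eq_true_iff (d1 d2 : PySem.Dict Char Int) (l : List Char) :
    aCmpLoop d1 d2 l = true ↔ ∀ c ∈ l, d1.getD c 0 ≤ d2.getD c 0 := by
  induction l with
  | nil => simp [aCmpLoop]
  | cons c rest ih =>
    simp only [aCmpLoop, List.forall_mem_cons]
    by_cases h : d1.getD c 0 ≤ d2.getD c 0
    · simp [h, ih]
    · simp [h]

lemma aCounter_eq_counter (l : List Char) : aCounter l = PySem.Dict.counter l := by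
  unfold aCounter
  rw [← PySem.Dict.foldl_insert_getD_add_one_eq_counter]
  congr 1
  funext d c
  by_cases h : d.contains c = true
  · rw [if_pos h]
  · rw [if_neg h, PySem.Dict.getD_of_not_contains d 0 (by simpa using h)]
    norm_num

lemma inneholder_eq_true_iff (s1 s2 : String) :
    inneholder s1 s2 = true ↔ countLE s1.toList s2.toList := by
  unfold inneholder
  rw [show (PySem.Set.empty : PySem.Set Char) = ([] : List Char) from rfl,
    ← PySem.Set.ofList_eq_foldl, aCounter_eq_counter, aCounter_eq_counter]
  by_cases hmem : aMemLoop (PySem.Set.ofList s2.toList) s1.toList = true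
  · rw [if_pos hmem, aCmpLoop_eq_true_iff]
    constructor
    · intro h c
      by_cases hc : c ∈ s1.toList
      · have := h c (by rw [PySem.Dict.keys_counter, PySem.Set.mem_ofList]; exact hc)
        simpa [PySem.Dict.getD_counter] using this
      · rw [List.count_eq_zero_of_not_mem hc]
        positivity
    · intro h c _
      simpa [PySem.Dict.getD_counter] using h c
  · rw [if_neg hmem]
    simp only [Bool.false_eq_true, false_iff]
    intro h
    apply hmem
    rw [aMemLoop_eq_true_iff]
    intro c hc
    rw [PySem.Set.mem_ofList]
    have h1 : (1 : Int) ≤ (s1.toList.count c : Int) := by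
      exact_mod_cast List.one_le_count_iff.mpr hc
    have := h c
    have : 0 < s2.toList.count c := by omega
    exact List.count_pos_iff.mp this

lemma bLoop_eq_true_iff (l : List Char) (d : PySem.Dict Char Int)
    (hpos : ∀ c : Char, 0 ≤ d.getD c 0) :
    bLoop d l = true ↔ ∀ c : Char, (l.count c : Int) ≤ d.getD c 0 := by
  induction l generalizing d with
  | nil => simpa [bLoop] using hpos
  | cons c rest ih =>
    by_cases h : d.getD c 0 = 0
    · have hd : (d.getD c 0 == 0) = true := by simpa using h
      simp only [bLoop, hd, if_true, Bool.false_eq_true, false_iff]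
      intro hall
      have hcount := hall c
      rw [List.count_cons_self, h] at hcount
      push_cast at hcount
      omega
    · have hd : (d.getD c 0 == 0) = false := by simpa using h
      simp only [bLoop, hd, Bool.false_eq_true, if_false]
      have hpos' : ∀ c' : Char, 0 ≤ (d.modify c 0 (· - 1)).getD c' 0 := by
        intro c'
        rw [PySem.Dict.getD_modify]
        split_ifs with hc
        · have := hpos c; omega
        · exact hpos c'
      rw [ih _ hpos']
      have key : ∀ c' : Char,
          ((rest.count c' : Int) ≤ (d.modify c 0 (· - 1)).getD c' 0)
            ↔ (((c :: rest).count c' : Int) ≤ d.getD c' 0) := by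
        intro c'
        rw [PySem.Dict.getD_modify, List.count_cons]
        by_cases hc : c' = c
        · subst hc
          rw [if_pos rfl]
          simp only [beq_self_eq_true, if_true]
          push_cast
          omega
        · rw [if_neg hc]
          have h3 : (c == c') = false := by
            simpa using (show ¬ c = c' from fun h => hc h.symm)
          simp only [h3, Bool.false_eq_true, if_false]
          push_cast
          omega
      exact ⟨fun hall c' => (key c').mp (hall c'), fun hall c' => (key c').mpr (hall c')⟩

lemma inneholder_alt_eq_true_iff (s1 s2 : String) :
    inneholder_alt s1 s2 = true ↔ countLE s1.toList s2.toList := by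
  unfold inneholder_alt
  rw [bLoop_eq_true_iff]
  · unfold countLE
    constructor <;> intro h c <;>
      have := h c <;>
      simp only [PySem.Dict.getD_foldl_modify_add_one, PySem.Dict.getD_empty, zero_add] at * <;>
      exact this
  · intro c
    rw [PySem.Dict.getD_foldl_modify_add_one, PySem.Dict.getD_empty, zero_add]
    positivity

-- ===== VERDICT (by name: the statement is the Claim_ definition above) =====
theorem inneholder_spec : Claim_equal_inneholder := by
  intro str1 str2 _
  unfold Spec_inneholder
  rw [Bool.eq_iff_iff, inneholder_eq_true_iff, inneholder_alt_eq_true_iff]
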